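-- pv_equiv track=rewrite | github.com/ThHuberResearch/coling-bloom | prompting/agreement.py | do_majority_voting
-- ===== SOURCE A (Python) =====
-- def do_majority_voting(
--         cognitive: list[tuple[str, str, str, str]],
--         knowledge: list[tuple[str, str, str, str]],
-- ) -> tuple[list[tuple[str, str, str, str]], list[tuple[str, str, str, str]]]:
--     cognitive_dict = {}
--     knowledge_dict = {}
--     for model, task, subtask, cls in cognitive:
--         if (model, task, subtask) not in cognitive_dict:
--             cognitive_dict[(model, task, subtask)] = {}
--         if cls not in cognitive_dict[(model, task, subtask)]:
--             cognitive_dict[(model, task, subtask)][cls] = 0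
--         cognitive_dict[(model, task, subtask)][cls] += 1
--     for model, task, subtask, cls in knowledge:
--         if (model, task, subtask) not in knowledge_dict:
--             knowledge_dict[(model, task, subtask)] = {}
--         if cls not in knowledge_dict[(model, task, subtask)]:
--             knowledge_dict[(model, task, subtask)][cls] = 0
--         knowledge_dict[(model, task, subtask)][cls] += 1
--     cognitive = []
--     knowledge = []
--     for (model, task, subtask), cls_dict in cognitive_dict.items():
--         cls = max(cls_dict, key=cls_dict.get)
--         cognitive.append((model, task, subtask, cls))
--     for (model, task, subtask), cls_dict in knowledge_dict.items():
--         cls = max(cls_dict, key=cls_dict.get)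
--         knowledge.append((model, task, subtask, cls))
--     cognitive = sorted(cognitive, key=lambda x: (x[0], x[1], x[2]))
--     knowledge = sorted(knowledge, key=lambda x: (x[0], x[1], x[2]))
--     return cognitive, knowledge
-- ===== SOURCE B (Python) =====
-- def do_majority_voting(
--         cognitive: list[tuple[str, str, str, str]],
--         knowledge: list[tuple[str, str, str, str]],
-- ) -> tuple[list[tuple[str, str, str, str]], list[tuple[str, str, str, str]]]:
--     def vote(rows):
--         out = []
--         for key in dict.fromkeys((m, t, s) for m, t, s, _ in rows):
--             classes = [c for (m, t, s, c) in rows if (m, t, s) == key]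
--             best = max(dict.fromkeys(classes), key=classes.count)
--             out.append(key + (best,))
--         return sorted(out, key=lambda x: (x[0], x[1], x[2]))
--     return vote(cognitive), vote(knowledge)
-- ===== Notes on version B (the rewrite author's own statement) =====
-- stated objective: alternative
-- what changed: Replaces A's single-pass nested dict-of-dicts counting with a two-phase rescan: dedup the (model, task, subtask) keys in first-appearance order, then for each key filter the rows and pick the first count-maximal class of the deduped class list.
import Mathlib
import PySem

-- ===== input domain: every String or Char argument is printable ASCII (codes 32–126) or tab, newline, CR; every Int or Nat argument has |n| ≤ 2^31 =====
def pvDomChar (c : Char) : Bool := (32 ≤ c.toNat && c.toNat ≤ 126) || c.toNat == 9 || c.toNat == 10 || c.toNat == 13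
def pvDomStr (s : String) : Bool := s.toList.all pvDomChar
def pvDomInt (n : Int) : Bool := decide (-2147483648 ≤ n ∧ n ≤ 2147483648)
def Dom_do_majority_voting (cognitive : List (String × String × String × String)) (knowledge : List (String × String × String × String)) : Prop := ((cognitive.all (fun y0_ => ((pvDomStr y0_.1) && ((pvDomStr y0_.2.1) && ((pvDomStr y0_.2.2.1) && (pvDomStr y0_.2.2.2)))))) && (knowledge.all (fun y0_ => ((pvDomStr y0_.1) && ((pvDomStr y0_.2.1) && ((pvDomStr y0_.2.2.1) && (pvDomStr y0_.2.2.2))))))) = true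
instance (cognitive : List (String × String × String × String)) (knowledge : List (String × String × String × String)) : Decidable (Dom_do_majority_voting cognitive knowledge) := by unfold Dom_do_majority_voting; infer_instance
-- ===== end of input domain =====

-- B replaces A's incrementally-built dict-of-dicts by a per-distinct-key rescan (dedup keys, filter, count);
-- same return value, objective: alternative decomposition (not claimed faster).

-- Python's sort key (x[0], x[1], x[2]): lexicographic order on the string triple
def pvSortKey (x : String × String × String × String) : String ×ₗ (String ×ₗ String) :=
  toLex (x.1, toLex (x.2.1, x.2.2.1))

-- ===== PORT A =====
-- the two counting loops (one per argument); mirrors the two 'if … not in' guards then '+= 1'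
def pvBuildA (rows : List (String × String × String × String)) :
    PySem.Dict (String × String × String) (PySem.Dict String Int) :=
  rows.foldl (fun d r =>
    let k := (r.1, r.2.1, r.2.2.1)
    let d := if d.contains k then d else d.insert k PySem.Dict.empty
    let inner := d.getD k PySem.Dict.empty
    let inner := if inner.contains r.2.2.2 then inner else inner.insert r.2.2.2 0
    d.insert k (inner.insert r.2.2.2 (inner.getD r.2.2.2 0 + 1))) PySem.Dict.empty

-- the append loops over dict.items(); max(cls_dict, key=cls_dict.get) = first count-maximal key
-- (maxD's default "" is never reached: every inner dict holds at least one class)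
def pvEmitA (d : PySem.Dict (String × String × String) (PySem.Dict String Int)) :
    List (String × String × String × String) :=
  d.items.foldl (fun acc p =>
    acc ++ [(p.1.1, p.1.2.1, p.1.2.2, PySem.List.maxD p.2.keys (fun c => p.2.getD c 0) "")]) []

def do_majority_voting (cognitive : List (String × String × String × String)) (knowledge : List (String × String × String × String)) : (List (String × String × String × String)) × (List (String × String × String × String)) :=
  (PySem.List.sorted (pvEmitA (pvBuildA cognitive)) pvSortKey false,
   PySem.List.sorted (pvEmitA (pvBuildA knowledge)) pvSortKey false)

-- ===== PORT B =====
-- Source B's sort key lambda (the same lambda appears in both Python sources; transcribed separately for B)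
def pvSortKeyB (x : String × String × String × String) : String ×ₗ (String ×ₗ String) :=
  toLex (x.1, toLex (x.2.1, x.2.2.1))
-- Source B's vote(rows): for each first-occurrence-deduped key, filter that key's classes,
-- take max(dict.fromkeys(classes), key=classes.count) (first maximal; list never empty inside the loop), sort
def pvVoteB (rows : List (String × String × String × String)) :
    List (String × String × String × String) :=
  PySem.List.sorted
    ((PySem.List.dedup (rows.map (fun r => (r.1, r.2.1, r.2.2.1)))).foldl (fun out key =>
      let classes := (rows.filter (fun r => ((r.1, r.2.1, r.2.2.1) : String × String × String) == key)).map (fun r => r.2.2.2)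
      out ++ [(key.1, key.2.1, key.2.2,
        PySem.List.maxD (PySem.List.dedup classes) (fun c => (List.count c classes : Int)) "")]) [])
    pvSortKeyB false

def do_majority_voting_alt (cognitive : List (String × String × String × String)) (knowledge : List (String × String × String × String)) : (List (String × String × String × String)) × (List (String × String × String × String)) :=
  (pvVoteB cognitive, pvVoteB knowledge)

-- ===== PRECONDITION & SPEC =====
def Spec_do_majority_voting (cognitive : List (String × String × String × String)) (knowledge : List (String × String × String × String)) (out : (List (String × String × String × String)) × (List (String × String × String × String))) : Prop := out = do_majority_voting_alt cognitive knowledge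
instance (cognitive : List (String × String × String × String)) (knowledge : List (String × String × String × String)) (out : (List (String × String × String × String)) × (List (String × String × String × String))) : Decidable (Spec_do_majority_voting cognitive knowledge out) := by unfold Spec_do_majority_voting; infer_instance

-- ===== CLAIM (what is proved, stated in full; the proofs are below) =====
def Claim_equal_do_majority_voting : Prop := ∀ (cognitive : List (String × String × String × String)) (knowledge : List (String × String × String × String)), Dom_do_majority_voting cognitive knowledge → Spec_do_majority_voting cognitive knowledge (do_majority_voting cognitive knowledge)

-- ===== LEMMAS AND PROOFS =====

-- A's loop body, normalised: one insert of the updated inner counter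
def pvStepS (d : PySem.Dict (String × String × String) (PySem.Dict String Int))
    (r : String × String × String × String) :
    PySem.Dict (String × String × String) (PySem.Dict String Int) :=
  d.insert (r.1, r.2.1, r.2.2.1)
    ((d.getD (r.1, r.2.1, r.2.2.1) PySem.Dict.empty).insert r.2.2.2
      ((d.getD (r.1, r.2.1, r.2.2.1) PySem.Dict.empty).getD r.2.2.2 0 + 1))

theorem pvStepA_eq (d : PySem.Dict (String × String × String) (PySem.Dict String Int))
    (r : String × String × String × String) :
    (let k := (r.1, r.2.1, r.2.2.1)
     let d := if d.contains k then d else d.insert k PySem.Dict.empty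
     let inner := d.getD k PySem.Dict.empty
     let inner := if inner.contains r.2.2.2 then inner else inner.insert r.2.2.2 0
     d.insert k (inner.insert r.2.2.2 (inner.getD r.2.2.2 0 + 1))) = pvStepS d r := by
  simp only [pvStepS]
  by_cases hk : d.contains (r.1, r.2.1, r.2.2.1)
  · simp only [hk, if_true]
    by_cases hc : (d.getD (r.1, r.2.1, r.2.2.1) PySem.Dict.empty).contains r.2.2.2
    · simp [hc]
    · have hcf : (d.getD (r.1, r.2.1, r.2.2.1) PySem.Dict.empty).contains r.2.2.2 = false := by
        simpa using hc
      rw [PySem.Dict.getD_of_not_contains _ 0 hcf]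
      simp [hc, PySem.Dict.getD_insert_self, PySem.Dict.insert_insert_self]
  · have hcf : d.contains (r.1, r.2.1, r.2.2.1) = false := by simpa using hk
    rw [PySem.Dict.getD_of_not_contains d PySem.Dict.empty hcf]
    simp [hk, PySem.Dict.getD_insert_self, PySem.Dict.insert_insert_self,
      PySem.Dict.getD_empty, PySem.Dict.contains_empty]

theorem pvBuildA_eq_foldS (rows : List (String × String × String × String)) :
    pvBuildA rows = rows.foldl pvStepS PySem.Dict.empty := by
  unfold pvBuildA
  exact PySem.List.foldl_congr_mem _ _ _ _ (fun acc x _ => pvStepA_eq acc x)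

-- the inner dict at key k after the fold: a counting fold over exactly the classes filed under k
theorem pvGetD_foldS (rows : List (String × String × String × String))
    (d : PySem.Dict (String × String × String) (PySem.Dict String Int))
    (k : String × String × String) :
    (rows.foldl pvStepS d).getD k PySem.Dict.empty =
      ((rows.filter (fun r => ((r.1, r.2.1, r.2.2.1) : String × String × String) == k)).map
        (fun r => r.2.2.2)).foldl
        (fun i c => i.insert c (i.getD c 0 + 1)) (d.getD k PySem.Dict.empty) := by
  induction rows generalizing d with
  | nil => simp
  | cons r rows ih =>
    simp only [List.foldl_cons, List.filter_cons]
    by_cases hk : ((r.1, r.2.1, r.2.2.1) : String × String × String) = k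
    · subst hk
      simp only [beq_self_eq_true, if_true, List.map_cons, List.foldl_cons, ih]
      simp [pvStepS, PySem.Dict.getD_insert_self]
    · rw [ih]
      have hb : (((r.1, r.2.1, r.2.2.1) : String × String × String) == k) = false := by
        simpa using hk
      simp only [hb, Bool.false_eq_true, if_false]
      congr 1
      simp only [pvStepS]
      exact PySem.Dict.getD_insert_of_ne _ _ _ (Ne.symm hk)

theorem pvKeys_foldS (rows : List (String × String × String × String)) :
    (rows.foldl pvStepS PySem.Dict.empty).keys =
      PySem.Set.ofList (rows.map (fun r => (r.1, r.2.1, r.2.2.1))) := by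
  have h := PySem.Dict.keys_foldl_insert_key rows
    (fun r => ((r.1, r.2.1, r.2.2.1) : String × String × String))
    (fun (d : PySem.Dict (String × String × String) (PySem.Dict String Int)) r =>
      ((d.getD (r.1, r.2.1, r.2.2.1) PySem.Dict.empty).insert r.2.2.2
        ((d.getD (r.1, r.2.1, r.2.2.1) PySem.Dict.empty).getD r.2.2.2 0 + 1)))
    PySem.Dict.empty
  exact h

theorem pvNodup_foldS (rows : List (String × String × String × String)) :
    (rows.foldl pvStepS PySem.Dict.empty).keys.Nodup := by
  rw [pvKeys_foldS]
  exact PySem.Set.nodup_ofList _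

-- the two pre-sort lists coincide
theorem pvEmitA_eq_voteB_pre (rows : List (String × String × String × String)) :
    pvEmitA (pvBuildA rows) =
      (PySem.List.dedup (rows.map (fun r => (r.1, r.2.1, r.2.2.1)))).foldl (fun out key =>
        let classes := (rows.filter (fun r => ((r.1, r.2.1, r.2.2.1) : String × String × String) == key)).map (fun r => r.2.2.2)
        out ++ [(key.1, key.2.1, key.2.2,
          PySem.List.maxD (PySem.List.dedup classes) (fun c => (List.count c classes : Int)) "")]) [] := by
  unfold pvEmitA
  rw [pvBuildA_eq_foldS,
    PySem.List.foldl_append_singleton_eq_map,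
    PySem.Dict.items_eq_map_keys _ (pvNodup_foldS rows) PySem.Dict.empty,
    pvKeys_foldS, List.map_map,
    PySem.List.foldl_append_singleton_eq_map]
  simp only [List.nil_append]
  apply List.map_congr_left
  intro k _
  have hcnt : (rows.foldl pvStepS PySem.Dict.empty).getD k PySem.Dict.empty =
      PySem.Dict.counter ((rows.filter (fun r => ((r.1, r.2.1, r.2.2.1) : String × String × String) == k)).map (fun r => r.2.2.2)) := by
    rw [pvGetD_foldS]
    simp [PySem.Dict.getD_empty, PySem.Dict.foldl_insert_getD_add_one_eq_counter]
  simp only [Function.comp, hcnt, PySem.Dict.keys_counter]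
  generalize List.map (fun r => r.2.2.2) (List.filter (fun r => (r.1, r.2.1, r.2.2.1) == k) rows) = cls
  rw [show PySem.Set.ofList cls = PySem.List.dedup cls from rfl,
    show (fun c => (PySem.Dict.counter cls).getD c 0) = (fun c => ((List.count c cls : Nat) : Int)) from
      funext fun c => PySem.Dict.getD_counter cls c]

-- ===== VERDICT (by name: the statement is the Claim_ definition above) =====
theorem do_majority_voting_spec : Claim_equal_do_majority_voting := by
  intro cognitive knowledge _
  unfold Spec_do_majority_voting do_majority_voting do_majority_voting_alt pvVoteB
  rw [pvEmitA_eq_voteB_pre cognitive, pvEmitA_eq_voteB_pre knowledge]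
  rfl
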